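-- pv_equiv track=rewrite | github.com/jichen3000/picture_sudoku | picture_sudoku/picture_analyzer/nonzero_rect.py | organize_nonzeros
-- ===== SOURCE A (Python) =====
-- def organize_nonzeros(nonzeros):
--     points = zip(nonzeros[0], nonzeros[1])
--     y_dict = {}
--     x_dict = {}
--     for y,x in points:
--         if y in y_dict.keys():
--             y_dict[y].append(x)
--         else:
--             y_dict[y] = [x]
--         if x in x_dict.keys():
--             x_dict[x].append(y)
--         else:
--             x_dict[x] = [y]
--     return (y_dict, x_dict)
-- ===== SOURCE B (Python) =====
-- def organize_nonzeros(nonzeros):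
--     # Simpler decomposition: materialise the points once, take the distinct keys
--     # in first-appearance order, and build each dict by a per-key comprehension.
--     points = list(zip(nonzeros[0], nonzeros[1]))
--     ys = list(dict.fromkeys(y for y, _ in points))
--     xs = list(dict.fromkeys(x for _, x in points))
--     y_dict = {y: [x for (yy, x) in points if yy == y] for y in ys}
--     x_dict = {x: [y for (y, xx) in points if xx == x] for x in xs}
--     return (y_dict, x_dict)
-- ===== Notes on version B (the rewrite author's own statement) =====
-- stated objective: simpler
-- what changed: Instead of one pass that mutates two dicts with in-place append-or-create branches, B lists the distinct keys (dict.fromkeys, first-appearance order) and builds each dict declaratively by a per-key comprehension over the materialised point list.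
import Mathlib
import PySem

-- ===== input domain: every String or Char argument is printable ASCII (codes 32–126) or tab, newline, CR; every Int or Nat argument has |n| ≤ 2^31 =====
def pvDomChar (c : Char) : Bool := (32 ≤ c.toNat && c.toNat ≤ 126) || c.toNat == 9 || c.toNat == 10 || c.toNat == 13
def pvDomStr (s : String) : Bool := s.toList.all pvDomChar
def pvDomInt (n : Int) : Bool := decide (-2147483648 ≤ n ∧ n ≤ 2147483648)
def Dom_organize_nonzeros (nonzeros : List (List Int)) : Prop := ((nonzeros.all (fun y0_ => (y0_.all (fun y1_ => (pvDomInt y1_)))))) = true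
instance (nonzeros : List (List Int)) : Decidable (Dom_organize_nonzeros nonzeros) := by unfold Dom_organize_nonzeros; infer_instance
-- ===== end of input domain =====

-- B replaces A's single mutating pass over two dicts by "distinct keys in first-appearance
-- order, then one per-key comprehension per dict" — a simpler, declarative decomposition.


-- ===== PORT A =====
-- points = zip(nonzeros[0], nonzeros[1]); one pass appending into two dicts.
-- nonzeros[0] / nonzeros[1] via pyGetD, total under Pre_ (length ≥ 2).
def organize_nonzeros (nonzeros : List (List Int)) : (List (Int × List Int)) × (List (Int × List Int)) :=
  let points := (PySem.List.pyGetD nonzeros 0 ([] : List Int)).zip (PySem.List.pyGetD nonzeros 1 ([] : List Int))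
  let st := points.foldl (fun (st : PySem.Dict Int (List Int) × PySem.Dict Int (List Int)) p =>
    ( if st.1.contains p.1 then st.1.insert p.1 (st.1.getD p.1 [] ++ [p.2]) else st.1.insert p.1 [p.2],
      if st.2.contains p.2 then st.2.insert p.2 (st.2.getD p.2 [] ++ [p.1]) else st.2.insert p.2 [p.1] ))
    (PySem.Dict.empty, PySem.Dict.empty)
  (st.1.items, st.2.items)

-- ===== PORT B =====
-- points materialised once; distinct keys by dict.fromkeys (= PySem.List.dedup);
-- each dict built by a per-key comprehension over points.
def organize_nonzeros_alt (nonzeros : List (List Int)) : (List (Int × List Int)) × (List (Int × List Int)) :=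
  let points := (PySem.List.pyGetD nonzeros 0 ([] : List Int)).zip (PySem.List.pyGetD nonzeros 1 ([] : List Int))
  let ys := PySem.List.dedup (points.map (fun p => p.1))
  let xs := PySem.List.dedup (points.map (fun p => p.2))
  ( ys.map (fun y => (y, (points.filter (fun p => p.1 == y)).map (fun p => p.2))),
    xs.map (fun x => (x, (points.filter (fun p => p.2 == x)).map (fun p => p.1))) )

-- ===== PRECONDITION & SPEC =====
-- A raises IndexError on nonzeros[0] / nonzeros[1] when nonzeros has fewer than two rows.
def Pre_organize_nonzeros (nonzeros : List (List Int)) : Prop := 2 ≤ nonzeros.length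
instance (nonzeros : List (List Int)) : Decidable (Pre_organize_nonzeros nonzeros) := by unfold Pre_organize_nonzeros; infer_instance
def pvWitness_organize_nonzeros : List (List Int) := [[1, 2, 1], [5, 6, 7]]
def Spec_organize_nonzeros (nonzeros : List (List Int)) (out : (List (Int × List Int)) × (List (Int × List Int))) : Prop := out = organize_nonzeros_alt nonzeros
instance (nonzeros : List (List Int)) (out : (List (Int × List Int)) × (List (Int × List Int))) : Decidable (Spec_organize_nonzeros nonzeros out) := by unfold Spec_organize_nonzeros; infer_instance

-- ===== CLAIM (what is proved, stated in full; the proofs are below) =====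
def Claim_equal_organize_nonzeros : Prop := ∀ (nonzeros : List (List Int)), Dom_organize_nonzeros nonzeros → Pre_organize_nonzeros nonzeros → Spec_organize_nonzeros nonzeros (organize_nonzeros nonzeros)

-- ===== LEMMAS AND PROOFS =====

-- A's append-or-create branch is exactly Dict.modify with default [].
theorem pv_branch_eq_modify (d : PySem.Dict Int (List Int)) (k : Int) (v : Int) :
    (if d.contains k then d.insert k (d.getD k [] ++ [v]) else d.insert k [v])
      = d.modify k [] (fun l => l ++ [v]) := by
  by_cases h : d.contains k = true
  · simp [h, PySem.Dict.modify]
  · simp only [Bool.not_eq_true] at h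
    simp [h, PySem.Dict.modify, PySem.Dict.getD_of_not_contains d [] h]

-- A's y-dict fold, written as the canonical grouping fold, has B's items list.
theorem pv_group_items (points : List (Int × Int)) :
    (points.foldl (fun (d : PySem.Dict Int (List Int)) p => d.modify p.1 [] (fun l => l ++ [p.2]))
        PySem.Dict.empty).items
      = (PySem.List.dedup (points.map (fun p => p.1))).map
          (fun y => (y, (points.filter (fun p => p.1 == y)).map (fun p => p.2))) := by
  have hnd : (points.foldl (fun (d : PySem.Dict Int (List Int)) p =>
      d.modify p.1 [] (fun l => l ++ [p.2])) PySem.Dict.empty).keys.Nodup := by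
    exact PySem.Dict.nodup_keys_foldl_modify_key points (fun p => p.1) []
      (fun _ p _ => _ ++ [p.2]) PySem.Dict.empty (by simp [PySem.Dict.keys_empty])
  rw [PySem.Dict.items_eq_map_keys _ hnd []]
  rw [PySem.Dict.keys_foldl_modify_key points (fun p => p.1) [] (fun _ p l => l ++ [p.2])]
  have hkeys : PySem.Set.update (PySem.Dict.empty (κ := Int) (ν := List Int)).keys
      (points.map (fun p => p.1)) = PySem.List.dedup (points.map (fun p => p.1)) := rfl
  rw [hkeys]
  refine List.map_congr_left (fun y _ => ?_)
  rw [PySem.Dict.getD_foldl_modify_append points PySem.Dict.empty y]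
  simp

theorem organize_nonzeros_eq (nonzeros : List (List Int)) :
    organize_nonzeros nonzeros = organize_nonzeros_alt nonzeros := by
  unfold organize_nonzeros organize_nonzeros_alt
  set points := (PySem.List.pyGetD nonzeros 0 ([] : List Int)).zip
      (PySem.List.pyGetD nonzeros 1 ([] : List Int)) with hp
  clear_value points
  -- split the paired fold into two independent folds
  have hsplit :
      points.foldl (fun (st : PySem.Dict Int (List Int) × PySem.Dict Int (List Int)) p =>
        ( if st.1.contains p.1 then st.1.insert p.1 (st.1.getD p.1 [] ++ [p.2]) else st.1.insert p.1 [p.2],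
          if st.2.contains p.2 then st.2.insert p.2 (st.2.getD p.2 [] ++ [p.1]) else st.2.insert p.2 [p.1] ))
        (PySem.Dict.empty, PySem.Dict.empty)
      = (points.foldl (fun d p => if d.contains p.1 then d.insert p.1 (d.getD p.1 [] ++ [p.2]) else d.insert p.1 [p.2]) PySem.Dict.empty,
         points.foldl (fun d p => if d.contains p.2 then d.insert p.2 (d.getD p.2 [] ++ [p.1]) else d.insert p.2 [p.1]) PySem.Dict.empty) :=
    PySem.List.foldl_prod_mk
      (fun d p => if d.contains p.1 then d.insert p.1 (d.getD p.1 [] ++ [p.2]) else d.insert p.1 [p.2])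
      (fun d p => if d.contains p.2 then d.insert p.2 (d.getD p.2 [] ++ [p.1]) else d.insert p.2 [p.1])
      points PySem.Dict.empty PySem.Dict.empty
  simp only [hsplit]
  have hy : (fun (d : PySem.Dict Int (List Int)) (p : Int × Int) =>
      if d.contains p.1 then d.insert p.1 (d.getD p.1 [] ++ [p.2]) else d.insert p.1 [p.2])
      = fun d p => d.modify p.1 [] (fun l => l ++ [p.2]) := by
    funext d p; exact pv_branch_eq_modify d p.1 p.2
  have hx : (fun (d : PySem.Dict Int (List Int)) (p : Int × Int) =>
      if d.contains p.2 then d.insert p.2 (d.getD p.2 [] ++ [p.1]) else d.insert p.2 [p.1])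
      = fun d p => d.modify p.2 [] (fun l => l ++ [p.1]) := by
    funext d p; exact pv_branch_eq_modify d p.2 p.1
  rw [hy, hx]
  refine Prod.ext ?_ ?_
  · exact pv_group_items points
  · -- the x-dict fold is the grouping fold over the swapped points
    have hswap :
        points.foldl (fun (d : PySem.Dict Int (List Int)) p => d.modify p.2 [] (fun l => l ++ [p.1])) PySem.Dict.empty
        = (points.map Prod.swap).foldl (fun d q => d.modify q.1 [] (fun l => l ++ [q.2])) PySem.Dict.empty := by
      rw [List.foldl_map]; simp [Prod.swap]
    simp only [hswap]
    rw [pv_group_items (points.map Prod.swap)]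
    simp only [List.map_map, List.filter_map]
    refine List.map_congr_left (fun x _ => ?_)
    simp [Function.comp_def, Prod.swap]

-- ===== VERDICT (by name: the statement is the Claim_ definition above) =====
theorem organize_nonzeros_spec : Claim_equal_organize_nonzeros := by
  intro nonzeros _ _
  unfold Spec_organize_nonzeros
  exact organize_nonzeros_eq nonzeros
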